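-- pv_equiv track=rewrite | github.com/mistakeknot/tldr-swinton | src/tldr_swinton/engines/difflens.py | _two_stage_prune
-- ===== SOURCE A (Python) =====
-- def _split_blocks_by_blank(lines: list[str]) -> list[tuple[int, int]]:
--     blocks: list[tuple[int, int]] = []
--     start = 0
--     idx = 0
--     while idx < len(lines):
--         if lines[idx].strip() == "" or lines[idx].strip() == "...":
--             if start < idx:
--                 blocks.append((start, idx - 1))
--             start = idx + 1
--         idx += 1
--     if start < len(lines):
--         blocks.append((start, len(lines) - 1))
--     return blocks or [(0, len(lines) - 1)]
--
-- def _two_stage_prune(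
--     code: str,
--     code_start: int,
--     diff_lines: list[int],
--     budget_tokens: int | None,
-- ) -> tuple[str, int, int]:
--     lines = code.splitlines()
--     blocks = _split_blocks_by_blank(lines)
--     block_count = len(blocks)
--     if block_count == 0:
--         return code, 0, 0
--
--     def _line_in_block(block: tuple[int, int], line_no: int) -> bool:
--         idx = line_no - code_start
--         return block[0] <= idx <= block[1]
--
--     keep_indexes: list[int] = []
--     for b_idx, block in enumerate(blocks):
--         if any(_line_in_block(block, line_no) for line_no in diff_lines):
--             keep_indexes.append(b_idx)
--
--     if not keep_indexes:
--         keep_indexes = [0]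
--
--     expanded: set[int] = set()
--     for idx in keep_indexes:
--         expanded.add(idx)
--         if idx - 1 >= 0:
--             expanded.add(idx - 1)
--         if idx + 1 < block_count:
--             expanded.add(idx + 1)
--
--     keep = sorted(expanded)
--
--     max_blocks = None
--     if budget_tokens is not None:
--         if budget_tokens <= 800:
--             max_blocks = 1
--         elif budget_tokens <= 1600:
--             max_blocks = 2
--         else:
--             max_blocks = 3
--     if max_blocks is not None and len(keep) > max_blocks:
--         keep = keep[:max_blocks]
--
--     kept_lines: list[str] = []
--     for idx, block_idx in enumerate(keep):
--         if idx > 0: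
--             kept_lines.append("...")
--         start, end = blocks[block_idx]
--         kept_lines.extend(lines[start:end + 1])
--
--     dropped_blocks = max(0, block_count - len(keep))
--     return "\n".join(kept_lines), block_count, dropped_blocks
-- ===== SOURCE B (Python) =====
-- from bisect import bisect_left
--
--
-- def _split_blocks_by_blank(lines):
--     blocks = []
--     start = 0
--     idx = 0
--     while idx < len(lines):
--         if lines[idx].strip() == "" or lines[idx].strip() == "...":
--             if start < idx:
--                 blocks.append((start, idx - 1))
--             start = idx + 1
--         idx += 1
--     if start < len(lines):
--         blocks.append((start, len(lines) - 1))
--     return blocks or [(0, len(lines) - 1)]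
--
--
-- def _two_stage_prune(code, code_start, diff_lines, budget_tokens):
--     lines = code.splitlines()
--     blocks = _split_blocks_by_blank(lines)
--     block_count = len(blocks)
--
--     # Sort the diff positions once; a block (s, e) is touched iff the first
--     # sorted position >= s (found by bisection) is <= e.
--     idxs = sorted(d - code_start for d in diff_lines)
--
--     def _hit(b):
--         s, e = blocks[b]
--         j = bisect_left(idxs, s)
--         return j < len(idxs) and idxs[j] <= e
--
--     touched = [_hit(b) for b in range(block_count)]
--     if not any(touched):
--         touched[0] = True
--
--     keep = [b for b in range(block_count)
--             if touched[b]
--             or (b > 0 and touched[b - 1])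
--             or (b + 1 < block_count and touched[b + 1])]
--
--     if budget_tokens is not None:
--         max_blocks = 1 if budget_tokens <= 800 else 2 if budget_tokens <= 1600 else 3
--         keep = keep[:max_blocks]
--
--     pieces = []
--     for i, b in enumerate(keep):
--         if i > 0:
--             pieces.append("...")
--         s, e = blocks[b]
--         pieces.extend(lines[s:e + 1])
--
--     dropped = max(0, block_count - len(keep))
--     return "\n".join(pieces), block_count, dropped
-- ===== Notes on version B (the rewrite author's own statement) =====
-- stated objective: alternative
-- what changed: A tests every block against every diff line (any() scan per block) and rebuilds the kept indices via a set plus a sort; B sorts the diff positions once and finds each block's first candidate diff position by bisection, then builds the (already ordered) keep list by a single neighbour-aware filter over the block range, with no set and no final sort.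
import Mathlib
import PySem

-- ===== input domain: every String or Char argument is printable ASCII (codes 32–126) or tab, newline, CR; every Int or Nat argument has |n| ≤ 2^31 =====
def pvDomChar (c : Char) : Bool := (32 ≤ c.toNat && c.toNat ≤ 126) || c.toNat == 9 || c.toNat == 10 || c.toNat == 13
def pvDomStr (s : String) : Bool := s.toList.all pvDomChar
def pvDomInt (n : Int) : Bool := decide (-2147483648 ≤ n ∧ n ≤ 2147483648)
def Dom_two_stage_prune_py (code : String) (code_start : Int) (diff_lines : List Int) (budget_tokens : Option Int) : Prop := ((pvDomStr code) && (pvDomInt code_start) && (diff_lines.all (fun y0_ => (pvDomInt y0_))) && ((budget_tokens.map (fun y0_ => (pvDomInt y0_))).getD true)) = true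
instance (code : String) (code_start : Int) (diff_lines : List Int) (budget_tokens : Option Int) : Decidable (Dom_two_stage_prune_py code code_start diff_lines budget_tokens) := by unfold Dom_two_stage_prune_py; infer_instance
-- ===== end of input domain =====

-- B replaces A's per-block any() scan over all diff lines by one sort of the
-- diff positions plus a bisection per block, and builds the ordered keep list
-- directly by a neighbour-aware filter instead of A's set + sorted();
-- the block splitting and the final assembly are the same sub-tasks in both.

-- ===== PORT A =====
-- _split_blocks_by_blank (shared by both Pythons verbatim): the while loop is a
-- fold over the enumerated lines (idx, lines[idx]).
def pvSplitStep (st : List (Int × Int) × Int) (p : Int × String) : List (Int × Int) × Int :=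
  if PySem.Str.strip p.2 = "" ∨ PySem.Str.strip p.2 = "..." then
    ((if st.2 < p.1 then st.1 ++ [(st.2, p.1 - 1)] else st.1), p.1 + 1)
  else st

def pvSplitBlocks (lines : List String) : List (Int × Int) :=
  let st := (PySem.List.enumerate lines 0).foldl pvSplitStep ([], 0)
  let blocks := if st.2 < (lines.length : Int) then st.1 ++ [(st.2, (lines.length : Int) - 1)] else st.1
  if blocks = [] then [((0 : Int), (lines.length : Int) - 1)] else blocks

-- _line_in_block
def pvInBlock (code_start : Int) (block : Int × Int) (line_no : Int) : Bool :=
  decide (block.1 ≤ line_no - code_start ∧ line_no - code_start ≤ block.2)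

-- the keep_indexes loop of A
def pvKeepIdx (code_start : Int) (diff_lines : List Int) (blocks : List (Int × Int)) : List Int :=
  (PySem.List.enumerate blocks 0).foldl
    (fun acc p => if diff_lines.any (pvInBlock code_start p.2) then acc ++ [p.1] else acc) []

-- the expanded-set loop of A
def pvExpand (count : Int) (ks : List Int) : PySem.Set Int :=
  ks.foldl (fun s idx =>
    let s1 := PySem.Set.add s idx
    let s2 := if 0 ≤ idx - 1 then PySem.Set.add s1 (idx - 1) else s1
    if idx + 1 < count then PySem.Set.add s2 (idx + 1) else s2) PySem.Set.empty

-- max_blocks from budget_tokens (identical in both Pythons)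
def pvMaxBlocks (budget_tokens : Option Int) : Option Int :=
  match budget_tokens with
  | none => none
  | some bt => if bt ≤ 800 then some 1 else if bt ≤ 1600 then some 2 else some 3

-- the kept_lines loop (identical in both Pythons); blocks[block_idx] is always
-- in range, pyGetD is the total form of that indexing
def pvAssemble (lines : List String) (blocks : List (Int × Int)) (keep : List Int) : List String :=
  (PySem.List.enumerate keep 0).foldl (fun acc p =>
    (if 0 < p.1 then acc ++ ["..."] else acc) ++
      PySem.List.slice lines (some (PySem.List.pyGetD blocks p.2 ((0 : Int), (0 : Int))).1)
        (some ((PySem.List.pyGetD blocks p.2 ((0 : Int), (0 : Int))).2 + 1))) []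

def two_stage_prune_py (code : String) (code_start : Int) (diff_lines : List Int) (budget_tokens : Option Int) : String × Int × Int :=
  let lines := PySem.Str.splitlines code
  let blocks := pvSplitBlocks lines
  let block_count := blocks.length
  if block_count = 0 then (code, 0, 0) else
  let keep_indexes := pvKeepIdx code_start diff_lines blocks
  let keep_indexes := if keep_indexes = [] then [(0 : Int)] else keep_indexes
  let expanded := pvExpand (block_count : Int) keep_indexes
  let keep := PySem.List.sorted expanded (fun x => x)
  let keep := match pvMaxBlocks budget_tokens with
    | some m => if PySem.List.len keep > m then PySem.List.slice keep none (some m) else keep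
    | none => keep
  (PySem.Str.join "\n" (pvAssemble lines blocks keep), (block_count : Int),
    max 0 ((block_count : Int) - PySem.List.len keep))

-- ===== PORT B =====
-- _hit: bisect the sorted diff positions at the block start, compare with the end
def pvbHit (idxs : List Int) (blk : Int × Int) : Bool :=
  let j := PySem.List.bisectLeft idxs blk.1
  decide (j < idxs.length) && decide (PySem.List.pyGetD idxs (j : Int) 0 ≤ blk.2)

-- touched = [_hit(b) for b in range(block_count)]
def pvbTouched (idxs : List Int) (blocks : List (Int × Int)) : List Bool :=
  (PySem.List.pyRange 0 (blocks.length : Int) 1).map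
    (fun b => pvbHit idxs (PySem.List.pyGetD blocks b ((0 : Int), (0 : Int))))

-- the keep comprehension over range(block_count)
def pvbKeep (count : Int) (touched : List Bool) : List Int :=
  (PySem.List.pyRange 0 count 1).filter (fun b =>
    PySem.List.pyGetD touched b false
    || (decide (0 < b) && PySem.List.pyGetD touched (b - 1) false)
    || (decide (b + 1 < count) && PySem.List.pyGetD touched (b + 1) false))

def two_stage_prune_py_alt (code : String) (code_start : Int) (diff_lines : List Int) (budget_tokens : Option Int) : String × Int × Int :=
  let lines := PySem.Str.splitlines code
  let blocks := pvSplitBlocks lines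
  let block_count := blocks.length
  let idxs := PySem.List.sorted (diff_lines.map (fun d => d - code_start)) (fun x => x)
  let touched := pvbTouched idxs blocks
  let touched := if touched.any id = false then PySem.List.pySetD touched 0 true else touched
  let keep := pvbKeep (block_count : Int) touched
  let keep := match pvMaxBlocks budget_tokens with
    | some m => PySem.List.slice keep none (some m)
    | none => keep
  (PySem.Str.join "\n" (pvAssemble lines blocks keep), (block_count : Int),
    max 0 ((block_count : Int) - PySem.List.len keep))

-- ===== PRECONDITION & SPEC =====
def Spec_two_stage_prune_py (code : String) (code_start : Int) (diff_lines : List Int) (budget_tokens : Option Int) (out : String × Int × Int) : Prop := out = two_stage_prune_py_alt code code_start diff_lines budget_tokens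
instance (code : String) (code_start : Int) (diff_lines : List Int) (budget_tokens : Option Int) (out : String × Int × Int) : Decidable (Spec_two_stage_prune_py code code_start diff_lines budget_tokens out) := by unfold Spec_two_stage_prune_py; infer_instance

-- ===== CLAIM (what is proved, stated in full; the proofs are below) =====
def Claim_equal_two_stage_prune_py : Prop := ∀ (code : String) (code_start : Int) (diff_lines : List Int) (budget_tokens : Option Int), Dom_two_stage_prune_py code code_start diff_lines budget_tokens → Spec_two_stage_prune_py code code_start diff_lines budget_tokens (two_stage_prune_py code code_start diff_lines budget_tokens)

-- ===== LEMMAS AND PROOFS =====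

-- the block-touch test both programs compute, as a predicate on the block number
def pvHitP (cs : Int) (diff : List Int) (blocks : List (Int × Int)) (n : Nat) : Bool :=
  diff.any (pvInBlock cs (blocks.getD n ((0 : Int), (0 : Int))))

theorem pv_orElse_ne_nil (bl : List (Int × Int)) (z : Int) :
    (if bl = [] then [((0 : Int), z)] else bl) ≠ [] := by
  split
  · simp
  · assumption

theorem pvSplitBlocks_ne_nil (lines : List String) : pvSplitBlocks lines ≠ [] := by
  unfold pvSplitBlocks
  exact pv_orElse_ne_nil _ _

theorem pv_window (ys : List Int) (s e : Int) (h : ys.Pairwise (· ≤ ·)) :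
    ((decide (PySem.List.bisectLeft ys s < ys.length)
      && decide (PySem.List.pyGetD ys ((PySem.List.bisectLeft ys s : Nat) : Int) 0 ≤ e)) = true
    ↔ ∃ x ∈ ys, s ≤ x ∧ x ≤ e) := by
  obtain ⟨hle, hlt, hge⟩ := PySem.List.bisectLeft_spec ys s h
  simp only [Bool.and_eq_true, decide_eq_true_eq, PySem.List.pyGetD_natCast]
  constructor
  · rintro ⟨hj, hv⟩
    refine ⟨ys[PySem.List.bisectLeft ys s], List.getElem_mem _, hge _ hj le_rfl, ?_⟩
    rwa [List.getD_eq_getElem ys 0 hj] at hv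
  · rintro ⟨x, hx, hsx, hxe⟩
    obtain ⟨i, hi, rfl⟩ := List.getElem_of_mem hx
    have hji : PySem.List.bisectLeft ys s ≤ i := by
      by_contra hc
      exact absurd (hlt i hi (by omega)) (by omega)
    refine ⟨by omega, ?_⟩
    rw [List.getD_eq_getElem ys 0 (by omega)]
    calc ys[PySem.List.bisectLeft ys s] ≤ ys[i] := by
          rcases eq_or_lt_of_le hji with heq | hlt'
          · simp [heq]
          · exact List.pairwise_iff_getElem.mp h _ _ _ _ hlt'
      _ ≤ e := hxe

theorem pvbHit_eq (cs : Int) (diff : List Int) (blk : Int × Int) :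
    pvbHit (PySem.List.sorted (diff.map (fun d => d - cs)) (fun x => x)) blk
      = diff.any (pvInBlock cs blk) := by
  have hpw : (PySem.List.sorted (diff.map (fun d => d - cs)) (fun x => x)).Pairwise (· ≤ ·) := by
    simpa using PySem.List.sorted_pairwise (diff.map (fun d => d - cs)) (fun x => x)
  have hmem : ∀ x, x ∈ PySem.List.sorted (diff.map (fun d => d - cs)) (fun x => x)
      ↔ x ∈ diff.map (fun d => d - cs) :=
    fun x => (PySem.List.sorted_perm (diff.map (fun d => d - cs)) (fun x => x) false).mem_iff
  rcases hb : diff.any (pvInBlock cs blk) with _ | _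
  · rw [Bool.eq_false_iff]
    intro hc
    obtain ⟨x, hx, hsx, hxe⟩ := (pv_window _ blk.1 blk.2 hpw).mp hc
    rw [hmem] at hx
    obtain ⟨d, hd, rfl⟩ := List.mem_map.mp hx
    have : diff.any (pvInBlock cs blk) = true :=
      List.any_eq_true.mpr ⟨d, hd, by simp [pvInBlock]; omega⟩
    simp [hb] at this
  · obtain ⟨d, hd, hdb⟩ := List.any_eq_true.mp hb
    simp only [pvInBlock, decide_eq_true_eq] at hdb
    exact (pv_window _ blk.1 blk.2 hpw).mpr
      ⟨d - cs, (hmem _).mpr (List.mem_map.mpr ⟨d, hd, rfl⟩), hdb.1, hdb.2⟩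

theorem pvKeepIdx_mem (cs : Int) (diff : List Int) (blocks : List (Int × Int)) (k : Int) :
    k ∈ pvKeepIdx cs diff blocks
      ↔ ∃ n : Nat, n < blocks.length ∧ k = (n : Int) ∧ pvHitP cs diff blocks n = true := by
  unfold pvKeepIdx
  rw [PySem.List.foldl_append_if (fun p => diff.any (pvInBlock cs p.2)) Prod.fst]
  simp only [List.nil_append, List.mem_map, List.mem_filter, PySem.List.mem_enumerate_iff]
  constructor
  · rintro ⟨p, ⟨⟨n, hn, rfl⟩, hany⟩, rfl⟩
    exact ⟨n, hn, by simp, by simpa [pvHitP, List.getElem?_eq_getElem, hn] using hany⟩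
  · rintro ⟨n, hn, rfl, hhit⟩
    exact ⟨((n : Int), blocks[n]), ⟨⟨n, hn, by simp⟩,
      by simpa [pvHitP, List.getElem?_eq_getElem, hn] using hhit⟩, rfl⟩

theorem pvExpand_step_mem (count a x : Int) (s0 : PySem.Set Int) :
    (x ∈ (fun (s : PySem.Set Int) idx =>
      let s1 := PySem.Set.add s idx
      let s2 := if 0 ≤ idx - 1 then PySem.Set.add s1 (idx - 1) else s1
      if idx + 1 < count then PySem.Set.add s2 (idx + 1) else s2) s0 a)
    ↔ x ∈ s0 ∨ (x = a ∨ (x = a - 1 ∧ 0 ≤ a - 1) ∨ (x = a + 1 ∧ a + 1 < count)) := by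
  dsimp only
  split_ifs with h1 h2 h2 <;> simp only [PySem.Set.mem_add] <;> tauto

theorem pvExpand_mem_gen (count : Int) (ks : List Int) (s0 : PySem.Set Int) (x : Int) :
    x ∈ ks.foldl (fun s idx =>
      let s1 := PySem.Set.add s idx
      let s2 := if 0 ≤ idx - 1 then PySem.Set.add s1 (idx - 1) else s1
      if idx + 1 < count then PySem.Set.add s2 (idx + 1) else s2) s0
    ↔ x ∈ s0 ∨ ∃ k ∈ ks, x = k ∨ (x = k - 1 ∧ 0 ≤ k - 1) ∨ (x = k + 1 ∧ k + 1 < count) := by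
  induction ks generalizing s0 with
  | nil => simp
  | cons a t ih =>
    rw [List.foldl_cons, ih, pvExpand_step_mem, List.exists_mem_cons_iff]
    exact or_assoc

theorem pvExpand_mem (count : Int) (ks : List Int) (x : Int) :
    x ∈ pvExpand count ks
      ↔ ∃ k ∈ ks, x = k ∨ (x = k - 1 ∧ 0 ≤ k - 1) ∨ (x = k + 1 ∧ k + 1 < count) := by
  unfold pvExpand
  rw [pvExpand_mem_gen]
  simp [PySem.Set.empty]

theorem pvExpand_nodup_gen (count : Int) (ks : List Int) (s0 : PySem.Set Int) (h : s0.Nodup) :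
    (ks.foldl (fun s idx =>
      let s1 := PySem.Set.add s idx
      let s2 := if 0 ≤ idx - 1 then PySem.Set.add s1 (idx - 1) else s1
      if idx + 1 < count then PySem.Set.add s2 (idx + 1) else s2) s0).Nodup := by
  induction ks generalizing s0 with
  | nil => simpa
  | cons a t ih =>
    refine ih _ ?_
    dsimp only
    split_ifs <;> repeat' apply PySem.Set.nodup_add
    all_goals exact h

theorem pvExpand_nodup (count : Int) (ks : List Int) : (pvExpand count ks).Nodup :=
  pvExpand_nodup_gen count ks _ (by simp [PySem.Set.empty])

-- the element test both touched computations perform, per block number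
theorem pv_hitfun (cs : Int) (diff : List Int) (blocks : List (Int × Int)) (b : Int)
    (h0 : 0 ≤ b) (hN : b < (blocks.length : Int)) :
    pvbHit (PySem.List.sorted (diff.map (fun d => d - cs)) (fun x => x))
        (PySem.List.pyGetD blocks b ((0 : Int), (0 : Int)))
      = pvHitP cs diff blocks b.toNat := by
  rw [PySem.List.pyGetD_eq_getElem _ _ h0 hN, pvbHit_eq]
  unfold pvHitP
  rw [List.getD_eq_getElem _ _ (by omega)]

theorem pv_touched_any (cs : Int) (diff : List Int) (blocks : List (Int × Int)) :
    ((pvbTouched (PySem.List.sorted (diff.map (fun d => d - cs)) (fun x => x)) blocks).any id = true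
      ↔ ∃ n : Nat, n < blocks.length ∧ pvHitP cs diff blocks n = true) := by
  unfold pvbTouched
  rw [List.any_map, List.any_eq_true]
  constructor
  · rintro ⟨b, hb, hhit⟩
    obtain ⟨h0, hN⟩ := (PySem.List.mem_pyRange_one).mp hb
    refine ⟨b.toNat, by omega, ?_⟩
    rw [← pv_hitfun cs diff blocks b h0 hN]
    simpa using hhit
  · rintro ⟨n, hn, hhit⟩
    refine ⟨(n : Int), PySem.List.mem_pyRange_one.mpr ⟨by omega, by omega⟩, ?_⟩
    rw [Function.comp_apply, id_eq, pv_hitfun cs diff blocks (n : Int) (by omega) (by omega)]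
    simpa using hhit

theorem pv_touched_length (idxs : List Int) (blocks : List (Int × Int)) :
    (pvbTouched idxs blocks).length = blocks.length := by
  unfold pvbTouched
  rw [List.length_map, PySem.List.length_pyRange_one]
  omega

theorem pv_keep_eq (cs : Int) (diff : List Int) (blocks : List (Int × Int)) (hb : blocks ≠ []) :
    PySem.List.sorted
      (pvExpand (blocks.length : Int)
        (if pvKeepIdx cs diff blocks = [] then [(0 : Int)] else pvKeepIdx cs diff blocks))
      (fun x => x)
    = pvbKeep (blocks.length : Int)
        (if (pvbTouched (PySem.List.sorted (diff.map (fun d => d - cs)) (fun x => x)) blocks).any id = false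
         then PySem.List.pySetD (pvbTouched (PySem.List.sorted (diff.map (fun d => d - cs)) (fun x => x)) blocks) 0 true
         else pvbTouched (PySem.List.sorted (diff.map (fun d => d - cs)) (fun x => x)) blocks) := by
  have hcount : 0 < blocks.length := List.length_pos_of_ne_nil hb
  set N : Int := (blocks.length : Int) with hN
  set tB := pvbTouched (PySem.List.sorted (diff.map (fun d => d - cs)) (fun x => x)) blocks with htB
  set tB' := if tB.any id = false then PySem.List.pySetD tB 0 true else tB with htB'
  have hlen : tB.length = blocks.length := by rw [htB, pv_touched_length]
  -- in-range reads of tB are the touch test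
  have hread : ∀ b : Int, 0 ≤ b → b < N → PySem.List.pyGetD tB b false = pvHitP cs diff blocks b.toNat := by
    intro b h0 hbN
    rw [htB]
    unfold pvbTouched
    rw [PySem.List.pyGetD_map_pyRange_of_nonneg _ _ _ _ h0 hbN, pv_hitfun cs diff blocks b h0 hbN]
  apply PySem.List.sorted_eq_of_perm_of_pairwise_lt
  · -- permutation
    rw [List.perm_ext_iff_of_nodup
      (by unfold pvbKeep; exact List.Nodup.filter _ (PySem.List.nodup_pyRange_one 0 N))
      (pvExpand_nodup _ _)]
    intro a
    rw [pvExpand_mem]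
    unfold pvbKeep
    rw [List.mem_filter, iff_comm]
    simp only [PySem.List.mem_pyRange_one, Bool.or_eq_true, Bool.and_eq_true, decide_eq_true_eq]
    rcases hA : tB.any id with _ | _
    · -- no block touched: keep_indexes = [0], touched[0] forced to True
      have hTf : ∀ b : Int, 0 ≤ b → b < N → PySem.List.pyGetD tB' b false = decide (b = 0) := by
        intro b h0 hbN
        rw [htB', if_pos (by rw [hA]), PySem.List.pySetD_of_nonneg _ _ (le_refl (0:Int)),
          PySem.List.pyGetD_eq_getElem _ _ h0 (by rw [List.length_set]; omega), List.getElem_set]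
        by_cases hb0 : b = 0
        · subst hb0; simp
        · rw [if_neg (by omega)]
          have hhit : pvHitP cs diff blocks b.toNat = false := by
            by_contra hc
            have h1 : tB.any id = true := by
              rw [htB]
              exact (pv_touched_any cs diff blocks).mpr ⟨b.toNat, by omega, by simpa using hc⟩
            rw [hA] at h1; exact Bool.false_ne_true h1
          have hr := hread b h0 hbN
          rw [PySem.List.pyGetD_eq_getElem tB false h0 (by omega)] at hr
          rw [hr, hhit]
          simp [hb0]
      have hki : pvKeepIdx cs diff blocks = [] := by
        rw [List.eq_nil_iff_forall_not_mem]
        intro k hk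
        obtain ⟨n, hn, rfl, hhit⟩ := (pvKeepIdx_mem cs diff blocks k).mp hk
        have h1 : tB.any id = true := by
          rw [htB]; exact (pv_touched_any cs diff blocks).mpr ⟨n, hn, hhit⟩
        rw [hA] at h1; exact Bool.false_ne_true h1
      rw [hki, if_pos rfl]
      simp only [List.mem_singleton, exists_eq_left]
      constructor
      · rintro (rfl | ⟨ha, h01⟩ | ⟨rfl, h1N⟩)
        · exact ⟨⟨le_rfl, by omega⟩, Or.inl (Or.inl (by rw [hTf 0 le_rfl (by omega)]; simp))⟩
        · omega
        · exact ⟨⟨by omega, h1N⟩, Or.inl (Or.inr ⟨by omega,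
            by rw [hTf (0+1-1) (by omega) (by omega)]; norm_num⟩)⟩
      · rintro ⟨⟨h0, haN⟩, ((hTa | ⟨hpos, hTm⟩) | ⟨hlt, hTp⟩)⟩
        · rw [hTf a h0 haN] at hTa
          simp at hTa
          exact Or.inl hTa
        · rw [hTf (a-1) (by omega) (by omega)] at hTm
          simp at hTm
          right; right; constructor <;> omega
        · rw [hTf (a+1) (by omega) (by omega)] at hTp
          simp at hTp
          omega
    · -- some block touched: touched stays, keep_indexes nonempty
      have hTt : ∀ b : Int, 0 ≤ b → b < N → PySem.List.pyGetD tB' b false = pvHitP cs diff blocks b.toNat := by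
        intro b h0 hbN
        rw [htB', if_neg (by rw [hA]; simp), hread b h0 hbN]
      obtain ⟨n0, hn0, hhit0⟩ := (pv_touched_any cs diff blocks).mp (htB ▸ hA)
      have hne : pvKeepIdx cs diff blocks ≠ [] := by
        intro hnil
        have := (pvKeepIdx_mem cs diff blocks (n0 : Int)).mpr ⟨n0, hn0, rfl, hhit0⟩
        rw [hnil] at this; exact List.not_mem_nil this
      rw [if_neg hne]
      constructor
      · rintro ⟨k, hk, hnb⟩
        obtain ⟨n, hn, rfl, hhit⟩ := (pvKeepIdx_mem cs diff blocks k).mp hk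
        rcases hnb with rfl | ⟨rfl, h01⟩ | ⟨rfl, h1N⟩
        · refine ⟨⟨by omega, by omega⟩, Or.inl (Or.inl ?_)⟩
          rw [hTt _ (by omega) (by omega)]
          simpa using hhit
        · refine ⟨⟨by omega, by omega⟩, Or.inr ⟨by omega, ?_⟩⟩
          rw [hTt _ (by omega) (by omega)]
          have he : ((n:Int) - 1 + 1).toNat = n := by omega
          rw [he]; exact hhit
        · refine ⟨⟨by omega, by omega⟩, Or.inl (Or.inr ⟨by omega, ?_⟩)⟩
          rw [hTt _ (by omega) (by omega)]
          have he : ((n:Int) + 1 - 1).toNat = n := by omega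
          rw [he]; exact hhit
      · rintro ⟨⟨h0, haN⟩, ((hTa | ⟨hpos, hTm⟩) | ⟨hlt, hTp⟩)⟩
        · rw [hTt a h0 haN] at hTa
          exact ⟨a, (pvKeepIdx_mem cs diff blocks a).mpr ⟨a.toNat, by omega, by omega, hTa⟩,
            Or.inl rfl⟩
        · rw [hTt (a-1) (by omega) (by omega)] at hTm
          exact ⟨a - 1, (pvKeepIdx_mem cs diff blocks (a-1)).mpr ⟨(a-1).toNat, by omega, by omega, hTm⟩,
            Or.inr (Or.inr ⟨by omega, by omega⟩)⟩
        · rw [hTt (a+1) (by omega) (by omega)] at hTp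
          exact ⟨a + 1, (pvKeepIdx_mem cs diff blocks (a+1)).mpr ⟨(a+1).toNat, by omega, by omega, hTp⟩,
            Or.inr (Or.inl ⟨by omega, by omega⟩)⟩
  · unfold pvbKeep
    exact List.Pairwise.filter _ (PySem.List.pairwise_lt_pyRange_one 0 N)

theorem pv_slice_full (l : List Int) (m : Int) (h0 : 0 < m) (h : ¬ PySem.List.len l > m) :
    PySem.List.slice l none (some m) = l := by
  rw [PySem.List.slice_to l (le_of_lt h0)]
  apply List.take_of_length_le
  rw [PySem.List.len_eq] at h
  omega

theorem pv_trunc_aux (keep : List Int) (m : Int) (h0 : 0 < m) :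
    (if PySem.List.len keep > m then PySem.List.slice keep none (some m) else keep)
      = PySem.List.slice keep none (some m) := by
  split_ifs with h
  · rfl
  · exact (pv_slice_full keep m h0 h).symm

theorem pv_trunc_eq (keep : List Int) (bt : Option Int) :
    (match pvMaxBlocks bt with
      | some m => if PySem.List.len keep > m then PySem.List.slice keep none (some m) else keep
      | none => keep)
    = (match pvMaxBlocks bt with
      | some m => PySem.List.slice keep none (some m)
      | none => keep) := by
  cases bt with
  | none => rfl
  | some t =>
    simp only [pvMaxBlocks]
    split_ifs <;> exact pv_trunc_aux keep _ (by norm_num)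

-- ===== VERDICT (by name: the statement is the Claim_ definition above) =====
theorem two_stage_prune_py_spec : Claim_equal_two_stage_prune_py := by
  intro code cs diff bt _
  unfold Spec_two_stage_prune_py two_stage_prune_py two_stage_prune_py_alt
  dsimp only
  rw [if_neg (fun h => pvSplitBlocks_ne_nil (PySem.Str.splitlines code) (List.eq_nil_of_length_eq_zero h))]
  rw [pv_keep_eq cs diff _ (pvSplitBlocks_ne_nil (PySem.Str.splitlines code)), pv_trunc_eq]
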